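-- pv_equiv track=rewrite | github.com/pypi-data/pypi-mirror-365 | packages/py2nut/py2nut-5.2.2-py3-none-any.whl/pynut_2files/pyNutFiles/nutFiles.py | fLl_removeEmptyRows_EOF
-- ===== SOURCE A (Python) =====
-- def fLl_removeEmptyRows_EOF(ll_content, int_nbColFile=None):
--     ''' Remove the emtpy list at the end'''
--     if int_nbColFile is None:
--         for l_line in ll_content[::-1]:
--             if l_line != []:
--                 break
--             ll_content = ll_content[:-1]
--     else:
--         for l_line in ll_content[::-1]:
--             if l_line != [''] * int_nbColFile:
--                 break
--             ll_content = ll_content[:-1]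
--     return ll_content
-- ===== SOURCE B (Python) =====
-- def fLl_removeEmptyRows_EOF(ll_content, int_nbColFile=None):
--     empty = [] if int_nbColFile is None else [''] * int_nbColFile
--     last = 0
--     for i, row in enumerate(ll_content):
--         if row != empty:
--             last = i + 1
--     return ll_content[:last]
-- ===== Notes on version B (the rewrite author's own statement) =====
-- stated objective: alternative
-- what changed: Replaces A's backward scan over a reversed copy with repeated whole-list tail slicing by a single forward pass that tracks the index past the last non-empty row and slices once.
import Mathlib
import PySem

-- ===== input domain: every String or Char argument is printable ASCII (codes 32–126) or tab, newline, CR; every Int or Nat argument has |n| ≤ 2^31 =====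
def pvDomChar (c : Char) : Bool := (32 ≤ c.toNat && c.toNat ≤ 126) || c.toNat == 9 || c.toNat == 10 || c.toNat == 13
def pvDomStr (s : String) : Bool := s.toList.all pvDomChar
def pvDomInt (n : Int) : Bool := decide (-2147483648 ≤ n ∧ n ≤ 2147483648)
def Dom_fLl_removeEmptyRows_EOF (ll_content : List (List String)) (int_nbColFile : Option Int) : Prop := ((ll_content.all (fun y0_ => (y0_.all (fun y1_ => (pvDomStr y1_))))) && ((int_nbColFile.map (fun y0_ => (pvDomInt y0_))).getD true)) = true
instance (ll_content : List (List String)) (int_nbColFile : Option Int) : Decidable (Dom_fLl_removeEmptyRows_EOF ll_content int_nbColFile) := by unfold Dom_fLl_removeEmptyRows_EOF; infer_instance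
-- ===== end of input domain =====

-- B replaces A's backward scan with repeated tail-slicing by one forward pass that
-- tracks the index just past the last non-empty row, then slices once.
-- ===== PORT A =====
-- the for-loop over ll_content[::-1] (= ll.reverse, PySem.List.slice?_none_none_neg_one)
-- with break, rebinding ll_content = ll_content[:-1] each iteration
def pvALoop (e : List String) : List (List String) → List (List String) → List (List String)
  | [], cur => cur
  | l :: rest, cur =>
    if l ≠ e then cur
    else pvALoop e rest (PySem.List.slice cur none (some (-1)))

def fLl_removeEmptyRows_EOF (ll_content : List (List String)) (int_nbColFile : Option Int) : List (List String) :=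
  match int_nbColFile with
  | none => pvALoop [] ll_content.reverse ll_content
  | some n => pvALoop (List.replicate n.toNat "") ll_content.reverse ll_content
    -- [''] * n : empty for n ≤ 0, exactly List.replicate n.toNat ""

-- ===== PORT B =====
-- the forward for-loop over enumerate(ll_content) updating `last`
def pvBLoop (e : List String) : List (Int × List String) → Int → Int
  | [], last => last
  | (i, row) :: rest, last => pvBLoop e rest (if row ≠ e then i + 1 else last)

def fLl_removeEmptyRows_EOF_alt (ll_content : List (List String)) (int_nbColFile : Option Int) : List (List String) :=
  let e : List String := match int_nbColFile with
    | none => []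
    | some n => List.replicate n.toNat ""
  PySem.List.slice ll_content none (some (pvBLoop e (PySem.List.enumerate ll_content 0) 0))

-- ===== PRECONDITION & SPEC =====
def Spec_fLl_removeEmptyRows_EOF (ll_content : List (List String)) (int_nbColFile : Option Int) (out : List (List String)) : Prop := out = fLl_removeEmptyRows_EOF_alt ll_content int_nbColFile
instance (ll_content : List (List String)) (int_nbColFile : Option Int) (out : List (List String)) : Decidable (Spec_fLl_removeEmptyRows_EOF ll_content int_nbColFile out) := by unfold Spec_fLl_removeEmptyRows_EOF; infer_instance

-- ===== CLAIM (what is proved, stated in full; the proofs are below) =====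
def Claim_equal_fLl_removeEmptyRows_EOF : Prop := ∀ (ll_content : List (List String)) (int_nbColFile : Option Int), Dom_fLl_removeEmptyRows_EOF ll_content int_nbColFile → Spec_fLl_removeEmptyRows_EOF ll_content int_nbColFile (fLl_removeEmptyRows_EOF ll_content int_nbColFile)

-- ===== LEMMAS AND PROOFS =====

-- ===== VERDICT (by name: the statement is the Claim_ definition above) =====
-- Common characterisation: drop the trailing rows equal to e
def pvTrim (e : List String) (ll : List (List String)) : List (List String) :=
  (ll.reverse.dropWhile (fun l => l == e)).reverse

theorem pvALoop_eq (e : List String) (rs : List (List String)) :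
    pvALoop e rs rs.reverse = pvTrim e rs.reverse := by
  induction rs with
  | nil => simp [pvALoop, pvTrim]
  | cons l rest ih =>
    by_cases h : l = e
    · subst h
      simp only [pvALoop, pvTrim, ne_eq, not_true_eq_false, if_false,
        List.reverse_cons, List.reverse_append, List.reverse_reverse,
        PySem.List.slice_to_neg_one]
      have hd : (rest.reverse ++ [l]).dropLast = rest.reverse := by
        simp [List.dropLast_append_of_ne_nil]
      rw [hd]
      simpa [pvTrim] using ih
    · simp [pvALoop, pvTrim, h]

theorem pvBLoop_append (e : List String) (a b : List (Int × List String)) (acc : Int) :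
    pvBLoop e (a ++ b) acc = pvBLoop e b (pvBLoop e a acc) := by
  induction a generalizing acc with
  | nil => rfl
  | cons p rest ih => cases p; simp [pvBLoop, ih]

theorem pvBLoop_bounds (e : List String) (ll : List (List String)) (s acc : Int)
    (h0 : 0 ≤ acc) (h1 : acc ≤ s) :
    0 ≤ pvBLoop e (PySem.List.enumerate ll s) acc ∧
      pvBLoop e (PySem.List.enumerate ll s) acc ≤ s + ll.length := by
  induction ll generalizing s acc with
  | nil => simp [PySem.List.enumerate_nil, pvBLoop]; omega
  | cons x rest ih =>
    rw [PySem.List.enumerate_cons]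
    simp only [pvBLoop]
    split
    · have := ih (s + 1) (s + 1) (by omega) (by omega)
      simp only [List.length_cons]; push_cast; omega
    · have := ih (s + 1) acc h0 (by omega)
      simp only [List.length_cons]; push_cast; omega

theorem pvB_take (e : List String) (ll : List (List String)) :
    ll.take (pvBLoop e (PySem.List.enumerate ll 0) 0).toNat = pvTrim e ll := by
  induction ll using List.reverseRecOn with
  | nil => simp [PySem.List.enumerate_nil, pvBLoop, pvTrim]
  | append_singleton ll x ih =>
    rw [PySem.List.enumerate_append, pvBLoop_append]
    simp only [PySem.List.enumerate_cons, PySem.List.enumerate_nil, pvBLoop, zero_add]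
    by_cases h : x = e
    · rw [if_neg (by simp [h])]
      have hb := pvBLoop_bounds e ll 0 0 le_rfl le_rfl
      rw [List.take_append_of_le_length (by omega)]
      rw [ih]
      simp [pvTrim, h]
    · simp only [ne_eq, h, not_false_eq_true, if_true]
      have : ((ll.length : Int) + 1).toNat = ll.length + 1 := by omega
      rw [this]
      simp [pvTrim, h, List.take_of_length_le]

theorem fLl_removeEmptyRows_EOF_spec : Claim_equal_fLl_removeEmptyRows_EOF := by
  intro ll opt _
  unfold Spec_fLl_removeEmptyRows_EOF fLl_removeEmptyRows_EOF fLl_removeEmptyRows_EOF_alt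
  have key : ∀ e : List String,
      pvALoop e ll.reverse ll =
        PySem.List.slice ll none (some (pvBLoop e (PySem.List.enumerate ll 0) 0)) := by
    intro e
    have hb := pvBLoop_bounds e ll 0 0 le_rfl le_rfl
    rw [PySem.List.slice_to _ hb.1]
    have h1 := pvALoop_eq e ll.reverse
    rw [List.reverse_reverse] at h1
    rw [h1, pvB_take]
  cases opt with
  | none => exact key []
  | some n => exact key (List.replicate n.toNat "")
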